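-- pv_equiv track=rewrite | github.com/MINASAMIRHANNA/Mina_Bot | db_full_audit.py | pick_time_cols
-- ===== SOURCE A (Python) =====
-- from typing import Any, Dict, List, Optional, Tuple
--
-- def pick_time_cols(cols: List[str]) -> List[str]:
--     """
--     Heuristic: pick likely time columns (limit 4).
--     """
--     priority = [
--         "timestamp_ms", "timestamp",
--         "created_at_ms", "created_at",
--         "updated_at_ms", "updated_at",
--         "closed_at_ms", "closed_at",
--         "signal_time_ms", "signal_time",
--         "last_heartbeat_ms", "heartbeat", "last_scan_ms",
--         "date_utc", "date",
--     ]
--     chosen = []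
--     lower_cols = {c.lower(): c for c in cols}
--     for p in priority:
--         if p.lower() in lower_cols and lower_cols[p.lower()] not in chosen:
--             chosen.append(lower_cols[p.lower()])
--
--     # add extra candidates if still short
--     if len(chosen) < 4:
--         for c in cols:
--             cl = c.lower()
--             if any(k in cl for k in ["time", "timestamp", "created", "updated", "heartbeat", "closed", "date"]) and c not in chosen:
--                 chosen.append(c)
--             if len(chosen) >= 4:
--                 break
--
--     return chosen[:4]
-- ===== SOURCE B (Python) =====
-- from typing import List
--
-- _PRIORITY = [
--     "timestamp_ms", "timestamp",
--     "created_at_ms", "created_at",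
--     "updated_at_ms", "updated_at",
--     "closed_at_ms", "closed_at",
--     "signal_time_ms", "signal_time",
--     "last_heartbeat_ms", "heartbeat", "last_scan_ms",
--     "date_utc", "date",
-- ]
-- _PRIO_RANK = {p: i for i, p in enumerate(_PRIORITY)}
-- _KEYWORDS = ["time", "timestamp", "created", "updated", "heartbeat", "closed", "date"]
--
--
-- def pick_time_cols(cols: List[str]) -> List[str]:
--     """
--     Heuristic: pick likely time columns (limit 4): one keyed pass over the
--     columns (priority rank for exact priority names, len(_PRIORITY)+position
--     for keyword matches), then a stable sort by key and truncation to 4.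
--     """
--     keyed = []
--     seen = set()
--     for i, c in enumerate(cols):
--         if c in seen:
--             continue
--         cl = c.lower()
--         if cl in _PRIO_RANK:
--             keyed.append((_PRIO_RANK[cl], c))
--             seen.add(c)
--         elif any(k in cl for k in _KEYWORDS):
--             keyed.append((len(_PRIORITY) + i, c))
--             seen.add(c)
--     keyed.sort(key=lambda t: t[0])
--     return [c for _, c in keyed][:4]
-- ===== Notes on version B (the rewrite author's own statement) =====
-- stated objective: alternative
-- what changed: A makes two sequential filtering passes (a priority scan over a lowercase dict, then a column scan with an early break); B makes one keyed pass over the columns assigning each candidate an integer sort key (priority rank, or len(priority)+position for keyword fallbacks), dedups with a seen-set, stably sorts by key and takes the first 4. Pre_ excludes lists in which two distinct columns share the same lowercase form, where A's last-occurrence-wins dict reinsertion makes the chosen casing accidental.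
-- outside the precondition, e.g. on pick_time_cols(['Date', 'date']): A returns ['date', 'Date'], B returns ['Date', 'date']
import Mathlib
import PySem

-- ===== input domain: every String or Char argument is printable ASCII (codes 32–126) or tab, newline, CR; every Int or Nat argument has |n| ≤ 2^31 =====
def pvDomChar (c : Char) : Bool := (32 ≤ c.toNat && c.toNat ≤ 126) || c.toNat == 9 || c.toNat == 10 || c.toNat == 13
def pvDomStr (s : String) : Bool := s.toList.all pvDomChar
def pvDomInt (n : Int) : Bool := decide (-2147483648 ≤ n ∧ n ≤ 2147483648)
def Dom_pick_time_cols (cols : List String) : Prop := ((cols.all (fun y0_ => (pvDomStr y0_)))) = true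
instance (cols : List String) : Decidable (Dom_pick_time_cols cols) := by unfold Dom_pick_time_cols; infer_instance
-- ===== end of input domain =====

-- B replaces A's two sequential filtering passes by one keyed pass over the columns
-- plus a stable sort by integer key (alternative decomposition, same return value on Pre_).


-- shared module constants of Source A / Source B
def pvPriority : List String :=
  ["timestamp_ms", "timestamp",
   "created_at_ms", "created_at",
   "updated_at_ms", "updated_at",
   "closed_at_ms", "closed_at",
   "signal_time_ms", "signal_time",
   "last_heartbeat_ms", "heartbeat", "last_scan_ms",
   "date_utc", "date"]

def pvKeywords : List String :=
  ["time", "timestamp", "created", "updated", "heartbeat", "closed", "date"]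

-- ===== PORT A =====
-- {c.lower(): c for c in cols}
def pvLowerCols (cols : List String) : PySem.Dict String String :=
  cols.foldl (fun d c => d.insert (PySem.Str.lower c) c) PySem.Dict.empty

-- the fallback 'for c in cols: … if len(chosen) >= 4: break' loop of A
def pvFallbackA : List String → List String → List String
  | [], chosen => chosen
  | c :: rest, chosen =>
    let chosen' :=
      if (pvKeywords.any fun k => PySem.Str.isIn k (PySem.Str.lower c)) && !(chosen.contains c)
      then chosen ++ [c] else chosen
    if 4 ≤ chosen'.length then chosen' else pvFallbackA rest chosen'

def pick_time_cols (cols : List String) : List String :=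
  let lower_cols := pvLowerCols cols
  let chosen : List String := pvPriority.foldl (fun ch p =>
      match lower_cols.get? (PySem.Str.lower p) with
      | some v => if ch.contains v then ch else ch ++ [v]
      | none => ch) []
  let chosen := if chosen.length < 4 then pvFallbackA cols chosen else chosen
  chosen.take 4

-- ===== PORT B =====
-- _PRIO_RANK = {p: i for i, p in enumerate(_PRIORITY)}
def pvPrioRank : PySem.Dict String Int :=
  (PySem.List.enumerate pvPriority 0).foldl (fun d p => d.insert p.2 p.1) PySem.Dict.empty

def pick_time_cols_alt (cols : List String) : List String :=
  let st := (PySem.List.enumerate cols 0).foldl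
    (fun (st : List (Int × String) × PySem.Set String) p =>
      if st.2.contains p.2 then st
      else
        let cl := PySem.Str.lower p.2
        if pvPrioRank.contains cl then
          (st.1 ++ [(pvPrioRank.getD cl 0, p.2)], PySem.Set.add st.2 p.2)
        else if pvKeywords.any (fun k => PySem.Str.isIn k cl) then
          (st.1 ++ [((pvPriority.length : Int) + p.1, p.2)], PySem.Set.add st.2 p.2)
        else st)
    ([], PySem.Set.empty)
  ((PySem.List.sorted st.1 (fun t => t.1)).map (fun t => t.2)).take 4

-- ===== PRECONDITION & SPEC =====
-- Pre_ excludes lists in which two DISTINCT columns share the same lowercase form: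
-- there A's {c.lower(): c} dict keeps the last occurrence's casing by accident of
-- dict reinsertion, a corner on which either casing is defensible.
def Pre_pick_time_cols (cols : List String) : Prop :=
  List.Pairwise (fun a b => a = b ∨ PySem.Str.lower a ≠ PySem.Str.lower b) cols
instance (cols : List String) : Decidable (Pre_pick_time_cols cols) := by unfold Pre_pick_time_cols; infer_instance

def pvWitness_pick_time_cols : List String := ["timestamp", "Event_Date", "foo"]

def Spec_pick_time_cols (cols : List String) (out : List String) : Prop := out = pick_time_cols_alt cols
instance (cols : List String) (out : List String) : Decidable (Spec_pick_time_cols cols out) := by unfold Spec_pick_time_cols; infer_instance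

-- ===== CLAIM (what is proved, stated in full; the proofs are below) =====
def Claim_equal_pick_time_cols : Prop := ∀ (cols : List String), Dom_pick_time_cols cols → Pre_pick_time_cols cols → Spec_pick_time_cols cols (pick_time_cols cols)

-- ===== LEMMAS AND PROOFS =====

-- proof-side abbreviations
def pvKw (c : String) : Bool := pvKeywords.any fun k => PySem.Str.isIn k (PySem.Str.lower c)

def pvPrioCond (L : PySem.Dict String String) (c : String) : Bool :=
  pvPrioRank.contains (PySem.Str.lower c) && (L.get? (PySem.Str.lower c) == some c)

def pvRank (c : String) : Int := pvPrioRank.getD (PySem.Str.lower c) 0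

-- B's keyed pass, newly appended entries only
def pvScanB : List (Int × String) → PySem.Set String → List (Int × String)
  | [], _ => []
  | (i, c) :: rest, seen =>
    if seen.contains c then pvScanB rest seen
    else if pvPrioRank.contains (PySem.Str.lower c) then (pvRank c, c) :: pvScanB rest (PySem.Set.add seen c)
    else if pvKw c then ((pvPriority.length : Int) + i, c) :: pvScanB rest (PySem.Set.add seen c)
    else pvScanB rest seen

-- the same pass with A's dict-checked priority condition (proof device)
def pvScan (L : PySem.Dict String String) : List (Int × String) → PySem.Set String → List (Int × String)
  | [], _ => []
  | (i, c) :: rest, seen =>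
    if seen.contains c then pvScan L rest seen
    else if pvPrioCond L c then (pvRank c, c) :: pvScan L rest (PySem.Set.add seen c)
    else if pvKw c then ((pvPriority.length : Int) + i, c) :: pvScan L rest (PySem.Set.add seen c)
    else pvScan L rest seen

-- A's fallback pass without the break, newly appended columns only
def pvNewFall : List String → List String → List String
  | [], _ => []
  | c :: rest, chosen =>
    if (pvKeywords.any fun k => PySem.Str.isIn k (PySem.Str.lower c)) && !(chosen.contains c)
    then c :: pvNewFall rest (chosen ++ [c]) else pvNewFall rest chosen

-- A's priority selection, dedup check removed
def pvChosen1 (L : PySem.Dict String String) : List String :=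
  pvPriority.filterMap fun p => L.get? (PySem.Str.lower p)

-- the priority entries with their ranks, in rank order
def pvPPairs (L : PySem.Dict String String) : List (Int × String) :=
  (PySem.List.enumerate pvPriority 0).filterMap fun q =>
    (L.get? (PySem.Str.lower q.2)).map fun v => (q.1, v)

-- key predicate separating priority entries from fallback entries
def pvIsP (e : Int × String) : Bool := decide (e.1 < (pvPriority.length : Int))

-- ---- dictionary facts ----
theorem pvL_get (cols : List String) (k v : String)
    (h : (pvLowerCols cols).get? k = some v) : PySem.Str.lower v = k ∧ v ∈ cols := by
  induction cols using List.reverseRecOn with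
  | nil => simp [pvLowerCols, PySem.Dict.get?_empty] at h
  | append_singleton cs c ih =>
    rw [pvLowerCols, List.foldl_append] at h
    simp only [List.foldl] at h
    by_cases hk : k = PySem.Str.lower c
    · subst hk
      rw [PySem.Dict.get?_insert_self] at h
      cases h; simp
    · rw [PySem.Dict.get?_insert_of_ne _ _ (fun hh => hk hh)] at h
      rcases ih h with ⟨h1, h2⟩
      exact ⟨h1, by simp [h2]⟩

-- under Pre_, each column is its own dict value
theorem pvPre_get (cols : List String) (hpre : Pre_pick_time_cols cols) (c : String) (hc : c ∈ cols) :
    (pvLowerCols cols).get? (PySem.Str.lower c) = some c := by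
  induction cols using List.reverseRecOn with
  | nil => cases hc
  | append_singleton cs d ih =>
    rw [pvLowerCols, List.foldl_append]
    simp only [List.foldl]
    rw [Pre_pick_time_cols, List.pairwise_append] at hpre
    rcases hpre with ⟨hcs, _, hrel⟩
    by_cases hk : PySem.Str.lower c = PySem.Str.lower d
    · have hcd : c = d := by
        rcases List.mem_append.mp hc with hm | hm
        · rcases hrel c hm d (by simp) with h | h
          · exact h
          · exact absurd hk h
        · simpa using hm
      subst hcd
      rw [hk, PySem.Dict.get?_insert_self]
    · rw [PySem.Dict.get?_insert_of_ne _ _ (fun hh => hk hh)]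
      have hm : c ∈ cs := by
        rcases List.mem_append.mp hc with hm | hm
        · exact hm
        · exact absurd (by simp at hm; rw [hm]) hk
      exact ih hcs hm

-- under Pre_, B's membership test agrees with A's dict-checked condition on cols
theorem pvPre_cond (cols : List String) (hpre : Pre_pick_time_cols cols) (c : String) (hc : c ∈ cols)
    (h : pvPrioRank.contains (PySem.Str.lower c) = true) : pvPrioCond (pvLowerCols cols) c = true := by
  simp only [pvPrioCond, Bool.and_eq_true, beq_iff_eq]
  exact ⟨h, pvPre_get cols hpre c hc⟩

theorem pvScanB_eq (L : PySem.Dict String String) (l : List (Int × String)) (seen : PySem.Set String)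
    (H : ∀ p ∈ l, pvPrioRank.contains (PySem.Str.lower p.2) = true → pvPrioCond L p.2 = true) :
    pvScanB l seen = pvScan L l seen := by
  induction l generalizing seen with
  | nil => rfl
  | cons p rest ih =>
    obtain ⟨i, c⟩ := p
    have H' : ∀ q ∈ rest, pvPrioRank.contains (PySem.Str.lower q.2) = true → pvPrioCond L q.2 = true :=
      fun q hq => H q (List.mem_cons_of_mem _ hq)
    have hcond : pvPrioCond L c = pvPrioRank.contains (PySem.Str.lower c) := by
      by_cases h : pvPrioRank.contains (PySem.Str.lower c) = true
      · rw [h, H (i, c) (by simp) h]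
      · simp only [Bool.not_eq_true] at h
        rw [h]
        simp [pvPrioCond, h]
    have ihs : ∀ s, pvScanB rest s = pvScan L rest s := fun s => ih s H'
    rw [pvScanB, pvScan, hcond]
    by_cases h1 : seen.contains c = true <;>
      by_cases h2 : pvPrioRank.contains (PySem.Str.lower c) = true <;>
      by_cases h3 : pvKw c = true <;>
      simp [h1, h2, h3, ihs]

-- ---- pvPrioRank facts ----
theorem pvRank_items : pvPrioRank.items = (PySem.List.enumerate pvPriority 0).map (fun p => (p.2, p.1)) := by decide

theorem pvRank_keys_nodup : pvPrioRank.keys.Nodup := by decide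

theorem pvPrio_lower (p : String) (hp : p ∈ pvPriority) : PySem.Str.lower p = p := by
  fin_cases hp <;> decide

theorem pvRank_get_iff (s : String) (r : Int) :
    pvPrioRank.get? s = some r ↔ (r, s) ∈ PySem.List.enumerate pvPriority 0 := by
  constructor
  · intro h
    have := PySem.Dict.mem_items_of_get?_eq_some _ h
    rw [pvRank_items] at this
    simp only [List.mem_map] at this
    rcases this with ⟨p, hp, he⟩
    cases p
    simp at he
    obtain ⟨h1, h2⟩ := he
    subst h1; subst h2
    simpa using hp
  · intro h
    apply PySem.Dict.get?_of_mem_items _ _ pvRank_keys_nodup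
    rw [pvRank_items]
    exact List.mem_map.mpr ⟨(r, s), h, rfl⟩

theorem pvRank_contains_iff (s : String) : pvPrioRank.contains s = true ↔ s ∈ pvPriority := by
  rw [PySem.Dict.contains_iff_mem_keys]
  have h1 : pvPrioRank.keys = (pvPrioRank.items).map (·.1) := rfl
  rw [h1, pvRank_items]
  simp only [List.map_map]
  have h2 : ((fun (x : String × Int) => x.1) ∘ fun (p : Int × String) => (p.2, p.1)) = fun (p : Int × String) => p.2 := rfl
  rw [h2, PySem.List.map_snd_enumerate]

theorem pvRank_lt (L : PySem.Dict String String) (c : String) (h : pvPrioCond L c = true) :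
    0 ≤ pvRank c ∧ pvRank c < (pvPriority.length : Int) ∧ pvPrioRank.get? (PySem.Str.lower c) = some (pvRank c) := by
  have hc : pvPrioRank.contains (PySem.Str.lower c) = true := by
    simp only [pvPrioCond, Bool.and_eq_true] at h; exact h.1
  rw [PySem.Dict.contains_eq_isSome_get?] at hc
  rcases Option.isSome_iff_exists.mp hc with ⟨r, hr⟩
  have hrk : pvRank c = r := by
    simp [pvRank, PySem.Dict.getD_eq_get?_getD, hr]
  rcases (pvRank_get_iff _ _).mp hr with hmem
  rw [PySem.List.mem_enumerate_iff] at hmem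
  rcases hmem with ⟨k, hk, he⟩
  have hre : r = (k : Int) := by simpa using congrArg Prod.fst he
  subst hrk
  refine ⟨by omega, ?_, hr⟩
  rw [hre]; exact_mod_cast hk

-- ---- A-side characterisation ----
theorem pvA_fold (cols : List String) (ps : List String) (acc : List String)
    (hnd : (ps.map PySem.Str.lower).Nodup)
    (hfresh : ∀ p ∈ ps, ∀ v, (pvLowerCols cols).get? (PySem.Str.lower p) = some v → v ∉ acc) :
    ps.foldl (fun ch p =>
      match (pvLowerCols cols).get? (PySem.Str.lower p) with
      | some v => if ch.contains v then ch else ch ++ [v]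
      | none => ch) acc = acc ++ ps.filterMap (fun p => (pvLowerCols cols).get? (PySem.Str.lower p)) := by
  induction ps generalizing acc with
  | nil => simp
  | cons p rest ih =>
    simp only [List.foldl_cons, List.filterMap_cons]
    cases hv : (pvLowerCols cols).get? (PySem.Str.lower p) with
    | none =>
      exact ih acc (by simpa using hnd.of_cons) (fun q hq v h => hfresh q (List.mem_cons_of_mem _ hq) v h)
    | some v =>
      have hnv : (acc.contains v) = false := by
        simp only [List.contains_eq_mem, decide_eq_false_iff_not]
        exact hfresh p (by simp) v hv
      simp only [hnv, Bool.false_eq_true, if_false]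
      rw [ih (acc ++ [v]) (by simpa using hnd.of_cons)]
      · simp
      · intro q hq w hw
        simp only [List.mem_append, List.mem_singleton]
        rintro (hin | rfl)
        · exact hfresh q (List.mem_cons_of_mem _ hq) w hw hin
        · have h1 := (pvL_get _ _ _ hv).1
          have h2 := (pvL_get _ _ _ hw).1
          have heq : PySem.Str.lower q = PySem.Str.lower p := by rw [← h1, ← h2]
          have hne := (List.nodup_cons.mp hnd).1
          exact hne (by rw [← heq]; exact List.mem_map_of_mem hq)

theorem pvA_prio (cols : List String) :
    pvPriority.foldl (fun ch p =>
      match (pvLowerCols cols).get? (PySem.Str.lower p) with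
      | some v => if ch.contains v then ch else ch ++ [v]
      | none => ch) [] = pvChosen1 (pvLowerCols cols) := by
  rw [pvA_fold cols pvPriority [] (by decide) (by simp)]
  simp [pvChosen1]

theorem pvChosen1_iff (cols : List String) (c : String) :
    c ∈ pvChosen1 (pvLowerCols cols) ↔ pvPrioCond (pvLowerCols cols) c = true := by
  constructor
  · intro h
    simp only [pvChosen1, List.mem_filterMap] at h
    rcases h with ⟨p, hp, hv⟩
    rcases pvL_get _ _ _ hv with ⟨h1, _⟩
    rw [pvPrio_lower p hp] at hv h1
    simp only [pvPrioCond, Bool.and_eq_true, beq_iff_eq]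
    rw [h1]
    exact ⟨(pvRank_contains_iff p).mpr hp, hv⟩
  · intro h
    simp only [pvPrioCond, Bool.and_eq_true, beq_iff_eq] at h
    rcases h with ⟨h1, h2⟩
    have hp := (pvRank_contains_iff _).mp h1
    simp only [pvChosen1, List.mem_filterMap]
    exact ⟨PySem.Str.lower c, hp, by rw [pvPrio_lower _ hp]; exact h2⟩

theorem pvFallbackA_take (l ch : List String) :
    (pvFallbackA l ch).take 4 = (ch ++ pvNewFall l ch).take 4 := by
  induction l generalizing ch with
  | nil => simp [pvFallbackA, pvNewFall]
  | cons c rest ih =>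
    rw [pvFallbackA, pvNewFall]
    by_cases hc : ((pvKeywords.any fun k => PySem.Str.isIn k (PySem.Str.lower c)) && !(ch.contains c)) = true
    · rw [if_pos hc, if_pos hc]
      by_cases hlen : 4 ≤ (ch ++ [c]).length
      · rw [if_pos hlen]
        have hassoc : ch ++ c :: pvNewFall rest (ch ++ [c]) = (ch ++ [c]) ++ pvNewFall rest (ch ++ [c]) := by simp
        rw [hassoc, List.take_append_of_le_length hlen]
      · rw [if_neg hlen, ih]
        simp
    · rw [if_neg hc, if_neg hc]
      by_cases hlen : 4 ≤ ch.length
      · rw [if_pos hlen, List.take_append_of_le_length hlen]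
      · rw [if_neg hlen, ih]

-- ---- B-side characterisation ----
theorem pvB_fold (l : List (Int × String)) (keyed : List (Int × String)) (seen : PySem.Set String) :
    (l.foldl (fun (st : List (Int × String) × PySem.Set String) p =>
      if st.2.contains p.2 then st
      else
        let cl := PySem.Str.lower p.2
        if pvPrioRank.contains cl then
          (st.1 ++ [(pvPrioRank.getD cl 0, p.2)], PySem.Set.add st.2 p.2)
        else if pvKeywords.any (fun k => PySem.Str.isIn k cl) then
          (st.1 ++ [((pvPriority.length : Int) + p.1, p.2)], PySem.Set.add st.2 p.2)
        else st) (keyed, seen)).1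
    = keyed ++ pvScanB l seen := by
  induction l generalizing keyed seen with
  | nil => simp [pvScanB]
  | cons p rest ih =>
    obtain ⟨i, c⟩ := p
    rw [List.foldl_cons, pvScanB]
    simp only [pvKw, pvRank]
    by_cases h1 : seen.contains c = true
    · simp only [h1, if_pos]
      exact ih keyed seen
    · simp only [h1, Bool.false_eq_true, if_false]
      by_cases h2 : pvPrioRank.contains (PySem.Str.lower c) = true
      · simp only [h2, if_pos]
        rw [ih]
        simp
      · simp only [h2, Bool.false_eq_true, if_false]
        by_cases h3 : (pvKeywords.any fun k => PySem.Str.isIn k (PySem.Str.lower c)) = true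
        · simp only [h3, if_pos]
          rw [ih]
          simp
        · simp only [h3, Bool.false_eq_true, if_false]
          exact ih keyed seen

theorem pvScan_fall (cols : List String) (l : List (Int × String)) (seen : PySem.Set String) (accF : List String)
    (hInv : ∀ c, pvPrioCond (pvLowerCols cols) c = false → (c ∈ seen ↔ c ∈ accF))
    (hIdx : ∀ p ∈ l, 0 ≤ p.1) :
    ((pvScan (pvLowerCols cols) l seen).filter (fun e => !(pvIsP e))).map (·.2)
      = pvNewFall (l.map (·.2)) (pvChosen1 (pvLowerCols cols) ++ accF) := by
  induction l generalizing seen accF with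
  | nil => simp [pvScan, pvNewFall]
  | cons p rest ih =>
    obtain ⟨i, c⟩ := p
    rw [pvScan, List.map_cons, pvNewFall]
    by_cases h1 : seen.contains c = true
    · have hmem : c ∈ seen := (PySem.Set.contains_iff _ _).mp h1
      have hcont : ((pvChosen1 (pvLowerCols cols) ++ accF).contains c) = true := by
        simp only [List.contains_eq_mem, decide_eq_true_eq, List.mem_append]
        by_cases hp : pvPrioCond (pvLowerCols cols) c = true
        · exact Or.inl ((pvChosen1_iff cols c).mpr hp)
        · exact Or.inr ((hInv c (by simpa using hp)).mp hmem)
      rw [if_pos h1, hcont]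
      simp only [Bool.not_true, Bool.and_false, Bool.false_eq_true, if_false]
      exact ih seen accF hInv (fun q hq => hIdx q (List.mem_cons_of_mem _ hq))
    · rw [if_neg (by simpa using h1)]
      have hnmem : c ∉ seen := fun hm => h1 ((PySem.Set.contains_iff _ _).mpr hm)
      by_cases h2 : pvPrioCond (pvLowerCols cols) c = true
      · rw [if_pos h2]
        have hlt : pvIsP (pvRank c, c) = true := by
          simp only [pvIsP, decide_eq_true_eq]
          exact (pvRank_lt _ _ h2).2.1
        rw [List.filter_cons_of_neg (by simp [hlt])]
        have hcont : ((pvChosen1 (pvLowerCols cols) ++ accF).contains c) = true := by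
          simp only [List.contains_eq_mem, decide_eq_true_eq, List.mem_append]
          exact Or.inl ((pvChosen1_iff cols c).mpr h2)
        rw [hcont]
        simp only [Bool.not_true, Bool.and_false, Bool.false_eq_true, if_false]
        refine ih (PySem.Set.add seen c) accF ?_ (fun q hq => hIdx q (List.mem_cons_of_mem _ hq))
        intro d hd
        rw [← hInv d hd]
        constructor
        · intro hda
          rcases (PySem.Set.mem_add _ _ _).mp hda with h | rfl
          · exact h
          · rw [h2] at hd; cases hd
        · intro h; exact (PySem.Set.mem_add _ _ _).mpr (Or.inl h)
      · rw [if_neg (by simpa using h2)]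
        by_cases h3 : pvKw c = true
        · rw [if_pos h3]
          have hge : pvIsP ((pvPriority.length : Int) + i, c) = false := by
            have : (0:Int) ≤ i := hIdx (i, c) (by simp)
            simp only [pvIsP, decide_eq_false_iff_not]
            omega
          rw [List.filter_cons_of_pos (by simp [hge])]
          have hncont : ((pvChosen1 (pvLowerCols cols) ++ accF).contains c) = false := by
            simp only [List.contains_eq_mem, decide_eq_false_iff_not, List.mem_append]
            rintro (h | h)
            · rw [(pvChosen1_iff cols c).mp h] at h2; exact h2 rfl
            · exact hnmem ((hInv c (by simpa using h2)).mpr h)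
          rw [hncont]
          have h3' : (pvKeywords.any fun k => PySem.Str.isIn k (PySem.Str.lower c)) = true := h3
          simp only [h3', Bool.not_false, Bool.and_true, if_true, List.map_cons]
          have hassoc : pvChosen1 (pvLowerCols cols) ++ accF ++ [c] = pvChosen1 (pvLowerCols cols) ++ (accF ++ [c]) := by simp
          rw [hassoc]
          congr 1
          refine ih (PySem.Set.add seen c) (accF ++ [c]) ?_ (fun q hq => hIdx q (List.mem_cons_of_mem _ hq))
          intro d hd
          rw [PySem.Set.mem_add]
          rw [List.mem_append]
          rw [← hInv d hd]
          simp
        · rw [if_neg (by simpa using h3)]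
          have h3' : (pvKeywords.any fun k => PySem.Str.isIn k (PySem.Str.lower c)) = false := by
            simpa [pvKw] using h3
          rw [h3']
          simp only [Bool.false_and, Bool.false_eq_true, if_false]
          exact ih seen accF hInv (fun q hq => hIdx q (List.mem_cons_of_mem _ hq))

theorem pvScan_fall_keys (L : PySem.Dict String String) (l : List (Int × String)) (seen : PySem.Set String)
    (hpw : l.Pairwise (fun p q => p.1 < q.1)) (hIdx : ∀ p ∈ l, 0 ≤ p.1) :
    ((pvScan L l seen).filter (fun e => !(pvIsP e))).Pairwise (fun a b => a.1 < b.1)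
    ∧ ∀ e ∈ (pvScan L l seen).filter (fun e => !(pvIsP e)), ∃ p ∈ l, e.1 = (pvPriority.length : Int) + p.1 := by
  induction l generalizing seen with
  | nil => simp [pvScan]
  | cons p rest ih =>
    obtain ⟨i, c⟩ := p
    have hpw' := (List.pairwise_cons.mp hpw).2
    have hlt := (List.pairwise_cons.mp hpw).1
    have hIdx' : ∀ q ∈ rest, (0:Int) ≤ q.1 := fun q hq => hIdx q (List.mem_cons_of_mem _ hq)
    rw [pvScan]
    by_cases h1 : seen.contains c = true
    · rw [if_pos h1]
      rcases ih seen hpw' hIdx' with ⟨ha, hb⟩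
      exact ⟨ha, fun e he => (hb e he).imp (fun q h => ⟨List.mem_cons_of_mem _ h.1, h.2⟩)⟩
    · rw [if_neg (by simpa using h1)]
      by_cases h2 : pvPrioCond L c = true
      · rw [if_pos h2]
        rw [List.filter_cons_of_neg (by simp [pvIsP, (pvRank_lt L c h2).2.1])]
        rcases ih (PySem.Set.add seen c) hpw' hIdx' with ⟨ha, hb⟩
        exact ⟨ha, fun e he => (hb e he).imp (fun q h => ⟨List.mem_cons_of_mem _ h.1, h.2⟩)⟩
      · rw [if_neg (by simpa using h2)]
        by_cases h3 : pvKw c = true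
        · rw [if_pos h3]
          rw [List.filter_cons_of_pos (by
            have : (0:Int) ≤ i := hIdx (i, c) (by simp)
            simp only [pvIsP, Bool.not_eq_true', decide_eq_false_iff_not]
            omega)]
          rcases ih (PySem.Set.add seen c) hpw' hIdx' with ⟨ha, hb⟩
          constructor
          · rw [List.pairwise_cons]
            refine ⟨?_, ha⟩
            intro e he
            rcases hb e he with ⟨q, hq, heq⟩
            have : i < q.1 := hlt q hq
            simp only [heq]
            omega
          · intro e he
            rcases List.mem_cons.mp he with rfl | he'
            · exact ⟨(i, c), by simp⟩
            · exact (hb e he').imp (fun q h => ⟨List.mem_cons_of_mem _ h.1, h.2⟩)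
        · rw [if_neg (by simpa using h3)]
          rcases ih seen hpw' hIdx' with ⟨ha, hb⟩
          exact ⟨ha, fun e he => (hb e he).imp (fun q h => ⟨List.mem_cons_of_mem _ h.1, h.2⟩)⟩

theorem pvScan_prio_mem (L : PySem.Dict String String) (l : List (Int × String)) (seen : PySem.Set String)
    (hIdx : ∀ p ∈ l, 0 ≤ p.1) (e : Int × String) :
    e ∈ (pvScan L l seen).filter pvIsP ↔
      (e.2 ∈ l.map (·.2) ∧ e.2 ∉ seen ∧ pvPrioCond L e.2 = true ∧ e.1 = pvRank e.2) := by
  induction l generalizing seen with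
  | nil => simp [pvScan]
  | cons p rest ih =>
    obtain ⟨i, c⟩ := p
    have hIdx' : ∀ q ∈ rest, (0:Int) ≤ q.1 := fun q hq => hIdx q (List.mem_cons_of_mem _ hq)
    rw [pvScan, List.map_cons]
    by_cases h1 : seen.contains c = true
    · rw [if_pos h1]
      have hcm : c ∈ seen := (PySem.Set.contains_iff _ _).mp h1
      rw [ih seen hIdx']
      simp only [List.mem_cons]
      constructor
      · rintro ⟨hm, hns, hp, hr⟩
        exact ⟨Or.inr hm, hns, hp, hr⟩
      · rintro ⟨hm, hns, hp, hr⟩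
        rcases hm with rfl | hm
        · exact absurd hcm hns
        · exact ⟨hm, hns, hp, hr⟩
    · rw [if_neg (by simpa using h1)]
      have hnmem : c ∉ seen := fun hm => h1 ((PySem.Set.contains_iff _ _).mpr hm)
      by_cases h2 : pvPrioCond L c = true
      · rw [if_pos h2]
        rw [List.filter_cons_of_pos (by simp [pvIsP, (pvRank_lt L c h2).2.1])]
        rw [List.mem_cons, ih (PySem.Set.add seen c) hIdx']
        simp only [List.mem_cons, PySem.Set.mem_add]
        constructor
        · rintro (rfl | ⟨hm, hns, hp, hr⟩)
          · exact ⟨Or.inl rfl, hnmem, h2, rfl⟩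
          · push_neg at hns
            exact ⟨Or.inr hm, hns.1, hp, hr⟩
        · rintro ⟨hm, hns, hp, hr⟩
          by_cases hec : e.2 = c
          · left
            have he1 : e.1 = pvRank c := by rw [hr, hec]
            obtain ⟨e1, e2⟩ := e
            simp only at hec he1
            rw [hec, he1]
          · right
            rcases hm with hc | hm
            · exact absurd hc hec
            · exact ⟨hm, by push_neg; exact ⟨hns, hec⟩, hp, hr⟩
      · rw [if_neg (by simpa using h2)]
        by_cases h3 : pvKw c = true
        · rw [if_pos h3]
          rw [List.filter_cons_of_neg (by
            have : (0:Int) ≤ i := hIdx (i, c) (by simp)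
            simp only [pvIsP, decide_eq_true_eq]
            omega)]
          rw [ih (PySem.Set.add seen c) hIdx']
          simp only [List.mem_cons, PySem.Set.mem_add]
          constructor
          · rintro ⟨hm, hns, hp, hr⟩
            push_neg at hns
            exact ⟨Or.inr hm, hns.1, hp, hr⟩
          · rintro ⟨hm, hns, hp, hr⟩
            have hec : e.2 ≠ c := fun h => by rw [h] at hp; rw [hp] at h2; exact h2 rfl
            rcases hm with hc | hm
            · exact absurd hc hec
            · exact ⟨hm, by push_neg; exact ⟨hns, hec⟩, hp, hr⟩
        · rw [if_neg (by simpa using h3)]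
          rw [ih seen hIdx']
          simp only [List.mem_cons]
          constructor
          · rintro ⟨hm, hns, hp, hr⟩
            exact ⟨Or.inr hm, hns, hp, hr⟩
          · rintro ⟨hm, hns, hp, hr⟩
            rcases hm with rfl | hm
            · exact absurd hp (by simpa using h2)
            · exact ⟨hm, hns, hp, hr⟩

theorem pvScan_prio_nodup (L : PySem.Dict String String) (l : List (Int × String)) (seen : PySem.Set String)
    (hIdx : ∀ p ∈ l, 0 ≤ p.1) :
    ((pvScan L l seen).filter pvIsP).Nodup := by
  induction l generalizing seen with
  | nil => simp [pvScan]
  | cons p rest ih =>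
    obtain ⟨i, c⟩ := p
    have hIdx' : ∀ q ∈ rest, (0:Int) ≤ q.1 := fun q hq => hIdx q (List.mem_cons_of_mem _ hq)
    rw [pvScan]
    by_cases h1 : seen.contains c = true
    · rw [if_pos h1]; exact ih seen hIdx'
    · rw [if_neg (by simpa using h1)]
      by_cases h2 : pvPrioCond L c = true
      · rw [if_pos h2]
        rw [List.filter_cons_of_pos (by simp [pvIsP, (pvRank_lt L c h2).2.1])]
        rw [List.nodup_cons]
        refine ⟨?_, ih (PySem.Set.add seen c) hIdx'⟩
        intro hmem
        have := (pvScan_prio_mem L rest (PySem.Set.add seen c) hIdx' _).mp hmem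
        rcases this with ⟨_, hns, _, _⟩
        exact hns ((PySem.Set.mem_add _ _ _).mpr (Or.inr rfl))
      · rw [if_neg (by simpa using h2)]
        by_cases h3 : pvKw c = true
        · rw [if_pos h3]
          rw [List.filter_cons_of_neg (by
            have : (0:Int) ≤ i := hIdx (i, c) (by simp)
            simp only [pvIsP, decide_eq_true_eq]
            omega)]
          exact ih (PySem.Set.add seen c) hIdx'
        · rw [if_neg (by simpa using h3)]
          exact ih seen hIdx'

-- ---- pvPPairs facts ----
theorem pvPPairs_mem (cols : List String) (e : Int × String) :
    e ∈ pvPPairs (pvLowerCols cols) ↔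
      (pvPrioCond (pvLowerCols cols) e.2 = true ∧ e.1 = pvRank e.2) := by
  simp only [pvPPairs, List.mem_filterMap, Option.map_eq_some_iff]
  constructor
  · rintro ⟨q, hq, v, hv, he⟩
    obtain ⟨r, p⟩ := q
    have hp : p ∈ pvPriority := by
      have := PySem.List.map_snd_enumerate pvPriority 0
      rw [← this]
      exact List.mem_map_of_mem hq
    rw [pvPrio_lower p hp] at hv
    have hlow := (pvL_get cols _ _ hv).1
    have hv2 : e.2 = v := by rw [← he]
    have he1 : e.1 = r := by rw [← he]
    subst hv2
    have hcond : pvPrioCond (pvLowerCols cols) e.2 = true := by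
      simp only [pvPrioCond, Bool.and_eq_true, beq_iff_eq]
      rw [hlow]
      exact ⟨(pvRank_contains_iff p).mpr hp, hv⟩
    refine ⟨hcond, ?_⟩
    have hgr : pvPrioRank.get? p = some r := (pvRank_get_iff p r).mpr hq
    have : pvRank e.2 = r := by
      simp [pvRank, hlow, PySem.Dict.getD_eq_get?_getD, hgr]
    omega
  · rintro ⟨hcond, hr⟩
    simp only [pvPrioCond, Bool.and_eq_true, beq_iff_eq] at hcond
    obtain ⟨hcont, hget⟩ := hcond
    have hp : PySem.Str.lower e.2 ∈ pvPriority := (pvRank_contains_iff _).mp hcont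
    rw [PySem.Dict.contains_eq_isSome_get?] at hcont
    rcases Option.isSome_iff_exists.mp hcont with ⟨r, hgr⟩
    have hrank : pvRank e.2 = r := by
      simp [pvRank, PySem.Dict.getD_eq_get?_getD, hgr]
    refine ⟨(r, PySem.Str.lower e.2), (pvRank_get_iff _ _).mp hgr, e.2, ?_, ?_⟩
    · rw [pvPrio_lower _ hp]; exact hget
    · obtain ⟨e1, e2⟩ := e; simp only at hr hrank ⊢
      rw [hr, hrank]

theorem pvPPairs_pairwise (L : PySem.Dict String String) :
    (pvPPairs L).Pairwise (fun a b => a.1 < b.1) := by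
  rw [pvPPairs, List.pairwise_filterMap]
  have := PySem.List.pairwise_lt_enumerate pvPriority 0
  refine this.imp ?_
  rintro ⟨r, p⟩ ⟨r', p'⟩ h b hb b' hb'
  simp only [Option.map_eq_some_iff] at hb hb'
  rcases hb with ⟨v, _, rfl⟩
  rcases hb' with ⟨v', _, rfl⟩
  exact h

theorem pvPPairs_map_snd (L : PySem.Dict String String) :
    (pvPPairs L).map (·.2) = pvChosen1 L := by
  rw [pvPPairs, pvChosen1]
  have hgen : ∀ (l : List (Int × String)),
      ((l.filterMap (fun q => (L.get? (PySem.Str.lower q.2)).map fun v => (q.1, v))).map (·.2))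
        = (l.map (·.2)).filterMap (fun p => L.get? (PySem.Str.lower p)) := by
    intro l
    induction l with
    | nil => simp
    | cons q rest ih =>
      obtain ⟨r, p⟩ := q
      simp only [List.filterMap_cons, List.map_cons]
      cases h : L.get? (PySem.Str.lower p) with
      | none => simpa using ih
      | some v => simp only [Option.map_some, List.filterMap_cons, List.map_cons, ih]
  rw [hgen, PySem.List.map_snd_enumerate]

-- ---- assembly ----
theorem pvA_eq (cols : List String) :
    pick_time_cols cols
      = (pvChosen1 (pvLowerCols cols) ++ pvNewFall cols (pvChosen1 (pvLowerCols cols))).take 4 := by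
  unfold pick_time_cols
  dsimp only
  rw [pvA_prio]
  by_cases h : (pvChosen1 (pvLowerCols cols)).length < 4
  · rw [if_pos h, pvFallbackA_take]
  · rw [if_neg h, List.take_append_of_le_length (by omega)]

theorem pvB_eq (cols : List String) (hpre : Pre_pick_time_cols cols) :
    pick_time_cols_alt cols
      = (pvChosen1 (pvLowerCols cols) ++ pvNewFall cols (pvChosen1 (pvLowerCols cols))).take 4 := by
  unfold pick_time_cols_alt
  dsimp only
  rw [pvB_fold (PySem.List.enumerate cols 0) [] PySem.Set.empty]
  rw [List.nil_append]
  set L := pvLowerCols cols with hL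
  have hH : ∀ p ∈ PySem.List.enumerate cols 0,
      pvPrioRank.contains (PySem.Str.lower p.2) = true → pvPrioCond L p.2 = true := by
    intro p hp hc
    have hmem : p.2 ∈ cols := by
      have := PySem.List.map_snd_enumerate cols 0
      rw [← this]
      exact List.mem_map_of_mem hp
    exact pvPre_cond cols hpre p.2 hmem hc
  rw [pvScanB_eq L _ PySem.Set.empty hH]
  set scan := pvScan L (PySem.List.enumerate cols 0) PySem.Set.empty with hscan
  have hIdx : ∀ p ∈ PySem.List.enumerate cols 0, (0:Int) ≤ p.1 := by
    intro p hp
    rw [PySem.List.mem_enumerate_iff] at hp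
    rcases hp with ⟨k, hk, rfl⟩
    simp
  have hpw : (PySem.List.enumerate cols 0).Pairwise (fun p q => p.1 < q.1) :=
    PySem.List.pairwise_lt_enumerate cols 0
  -- the sorted keyed list is the priority block followed by the fallback block
  have hperm : (pvPPairs L ++ scan.filter (fun e => !(pvIsP e))).Perm scan := by
    refine List.Perm.trans ?_ (List.filter_append_perm pvIsP scan)
    refine List.Perm.append ?_ (List.Perm.refl _)
    rw [List.perm_ext_iff_of_nodup ?_ (pvScan_prio_nodup L _ PySem.Set.empty hIdx)]
    · intro e
      rw [pvPPairs_mem cols e, pvScan_prio_mem L _ PySem.Set.empty hIdx e]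
      constructor
      · rintro ⟨hp, hr⟩
        have hmem : e.2 ∈ cols := by
          have hg : L.get? (PySem.Str.lower e.2) = some e.2 := by
            simp only [pvPrioCond, Bool.and_eq_true, beq_iff_eq] at hp
            exact hp.2
          exact (pvL_get cols _ _ hg).2
        refine ⟨?_, by simp [PySem.Set.empty], hp, hr⟩
        rw [PySem.List.map_snd_enumerate]
        exact hmem
      · rintro ⟨_, _, hp, hr⟩
        exact ⟨hp, hr⟩
    · exact (pvPPairs_pairwise L).imp (fun h => by intro he; rw [he] at h; omega)
  have hpair : (pvPPairs L ++ scan.filter (fun e => !(pvIsP e))).Pairwise (fun a b => a.1 < b.1) := by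
    rw [List.pairwise_append]
    refine ⟨pvPPairs_pairwise L, (pvScan_fall_keys L _ PySem.Set.empty hpw hIdx).1, ?_⟩
    intro a ha b hb
    have h1 : a.1 < (pvPriority.length : Int) := by
      rcases (pvPPairs_mem cols a).mp ha with ⟨hp, hr⟩
      rw [hr]
      exact (pvRank_lt L _ hp).2.1
    rcases (pvScan_fall_keys L _ PySem.Set.empty hpw hIdx).2 b hb with ⟨q, hq, hbq⟩
    have h2 := hIdx q hq
    omega
  rw [PySem.List.sorted_eq_of_perm_of_pairwise_lt scan (pvPPairs L ++ scan.filter (fun e => !(pvIsP e))) _ hperm hpair]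
  rw [List.map_append, pvPPairs_map_snd]
  have hfall := pvScan_fall cols (PySem.List.enumerate cols 0) PySem.Set.empty []
    (by intro c _; simp [PySem.Set.empty]) hIdx
  rw [PySem.List.map_snd_enumerate, List.append_nil] at hfall
  rw [← hscan] at hfall
  rw [hfall]

-- ===== VERDICT (by name: the statement is the Claim_ definition above) =====
theorem pick_time_cols_spec : Claim_equal_pick_time_cols := by
  intro cols _ hpre
  unfold Spec_pick_time_cols
  rw [pvA_eq, pvB_eq cols hpre]
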